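-- pv_equiv track=rewrite | github.com/jamtur01/gmail-typesense-search | index_mbox_typesense2.py | extract_entity_topics
-- ===== SOURCE A (Python) =====
-- from collections import defaultdict
-- from typing import (
--     Dict, List, Optional, Any, Tuple, Union
-- )
--
-- def extract_entity_topics(entities: List[Dict]) -> Dict[str, List[str]]:
--     """Group entities by topics"""
--     topics = {
--         "TECH": ["PRODUCT", "TECHNOLOGY", "SOFTWARE"],
--         "BUSINESS": ["ORG", "COMPANY", "MONEY"],
--         "PEOPLE": ["PERSON", "PER"],
--         "LOCATION": ["GPE", "LOC"],
--         "TIME": ["DATE", "TIME"]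
--     }
--
--     categorized = defaultdict(list)
--     for entity in entities:
--         for topic, labels in topics.items():
--             if entity["label"] in labels:
--                 categorized[topic].append(entity)
--
--     return dict(categorized)
-- ===== SOURCE B (Python) =====
-- def extract_entity_topics(entities):
--     """Group entities by topics"""
--     topics = {
--         "TECH": ["PRODUCT", "TECHNOLOGY", "SOFTWARE"],
--         "BUSINESS": ["ORG", "COMPANY", "MONEY"],
--         "PEOPLE": ["PERSON", "PER"],
--         "LOCATION": ["GPE", "LOC"],
--         "TIME": ["DATE", "TIME"]
--     }
--
--     def topic_of(entity):
--         for topic, labels in topics.items():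
--             if entity["label"] in labels:
--                 return topic
--         return None
--
--     order = []
--     for entity in entities:
--         topic = topic_of(entity)
--         if topic is not None and topic not in order:
--             order.append(topic)
--
--     return {topic: [e for e in entities if topic_of(e) == topic] for topic in order}
-- ===== Notes on version B (the rewrite author's own statement) =====
-- stated objective: alternative
-- what changed: Replaces the single pass building a defaultdict of lists with two staged passes: first compute the topic key order from first occurrences via a topic_of helper, then build each bucket by filtering the entity list per topic; no dict accumulator at all.
import Mathlib
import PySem

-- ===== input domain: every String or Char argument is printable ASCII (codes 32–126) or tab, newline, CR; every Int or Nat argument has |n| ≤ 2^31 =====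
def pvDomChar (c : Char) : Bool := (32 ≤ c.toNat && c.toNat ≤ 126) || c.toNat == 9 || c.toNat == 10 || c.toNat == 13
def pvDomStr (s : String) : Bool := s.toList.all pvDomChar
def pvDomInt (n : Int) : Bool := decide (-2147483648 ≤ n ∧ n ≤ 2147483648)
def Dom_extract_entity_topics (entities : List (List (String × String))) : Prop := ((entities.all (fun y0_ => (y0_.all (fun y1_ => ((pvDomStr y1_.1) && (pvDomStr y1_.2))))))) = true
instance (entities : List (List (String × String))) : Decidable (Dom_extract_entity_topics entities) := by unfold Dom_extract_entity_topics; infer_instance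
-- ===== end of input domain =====

-- B replaces A's one-pass defaultdict accumulation with two staged passes (key order
-- from first occurrences, then one filter of the entity list per topic); equivalent
-- because each label belongs to at most one topic. No observable mutation of the argument.

-- ===== PORT A =====
-- the literal `topics` table of A (and of B), in source order
def pvTopics : List (String × List String) :=
  [("TECH", ["PRODUCT", "TECHNOLOGY", "SOFTWARE"]),
   ("BUSINESS", ["ORG", "COMPANY", "MONEY"]),
   ("PEOPLE", ["PERSON", "PER"]),
   ("LOCATION", ["GPE", "LOC"]),
   ("TIME", ["DATE", "TIME"])]

-- A's loop body: for each (topic, labels), if entity["label"] in labels, append entity.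
-- entity["label"] via Dict.ofList (Python dict from pairs: last duplicate wins); under
-- Pre_ the lookup is some; `Dict.modify t [] (· ++ [e])` is defaultdict(list) append.
def pvAStep (cat : PySem.Dict String (List (List (String × String))))
    (e : List (String × String)) : PySem.Dict String (List (List (String × String))) :=
  pvTopics.foldl (fun c p =>
    if ((PySem.Dict.ofList e).get? "label").any (fun s => p.2.contains s)
    then c.modify p.1 [] (· ++ [e]) else c) cat

def extract_entity_topics (entities : List (List (String × String))) :
    List (String × List (List (String × String))) :=
  (entities.foldl pvAStep PySem.Dict.empty).items

-- ===== PORT B =====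
-- B's topic_of: return the first topic of the table whose label list holds the entity's label
def pvTopicOf (e : List (String × String)) : Option String :=
  ((PySem.Dict.ofList e).get? "label").bind fun s =>
    (pvTopics.find? (fun p => p.2.contains s)).map (·.1)

-- B's first pass: record each topic at its first occurrence
def pvOrderStep (o : List String) (e : List (String × String)) : List String :=
  match pvTopicOf e with
  | some t => if t ∈ o then o else o ++ [t]
  | none => o

-- B's second stage: a comprehension filtering the whole entity list per topic
def extract_entity_topics_alt (entities : List (List (String × String))) :
    List (String × List (List (String × String))) :=
  (entities.foldl pvOrderStep []).map
    (fun t => (t, entities.filter (fun e => pvTopicOf e == some t)))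

-- ===== PRECONDITION & SPEC =====
-- Pre_ excludes only entities with no "label" key, on which Python A (and B) raises KeyError.
def Pre_extract_entity_topics (entities : List (List (String × String))) : Prop :=
  ∀ e ∈ entities, "label" ∈ e.map Prod.fst
instance (entities : List (List (String × String))) : Decidable (Pre_extract_entity_topics entities) := by
  unfold Pre_extract_entity_topics; infer_instance

def pvWitness_extract_entity_topics : (List (List (String × String))) :=
  [[("label", "PERSON"), ("text", "Ada")], [("label", "XYZ")]]

def Spec_extract_entity_topics (entities : List (List (String × String))) (out : List (String × List (List (String × String)))) : Prop := out = extract_entity_topics_alt entities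
instance (entities : List (List (String × String))) (out : List (String × List (List (String × String)))) : Decidable (Spec_extract_entity_topics entities out) := by unfold Spec_extract_entity_topics; infer_instance

-- ===== CLAIM (what is proved, stated in full; the proofs are below) =====
def Claim_equal_extract_entity_topics : Prop := ∀ (entities : List (List (String × String))), Dom_extract_entity_topics entities → Pre_extract_entity_topics entities → Spec_extract_entity_topics entities (extract_entity_topics entities)

-- ===== LEMMAS AND PROOFS =====

-- proof-side reformulation of A's per-entity loop as one modify keyed by pvTopicOf
def pvStep1 (d : PySem.Dict String (List (List (String × String))))
    (e : List (String × String)) : PySem.Dict String (List (List (String × String))) :=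
  match pvTopicOf e with
  | some t => d.modify t [] (· ++ [e])
  | none => d

-- the label lists are pairwise disjoint, so A's fold over the table does (at most) one modify
theorem pvAStep_eq_step1 (c : PySem.Dict String (List (List (String × String))))
    (e : List (String × String)) : pvAStep c e = pvStep1 c e := by
  unfold pvAStep pvStep1 pvTopicOf
  cases hs : (PySem.Dict.ofList e).get? "label" with
  | none => simp [pvTopics]
  | some s =>
    by_cases hmem : s ∈ ["PRODUCT", "TECHNOLOGY", "SOFTWARE", "ORG", "COMPANY", "MONEY",
        "PERSON", "PER", "GPE", "LOC", "DATE", "TIME"]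
    · simp only [List.mem_cons, List.not_mem_nil, or_false] at hmem
      rcases hmem with rfl | rfl | rfl | rfl | rfl | rfl | rfl | rfl | rfl | rfl | rfl | rfl <;>
        simp [pvTopics]
    · simp only [List.mem_cons, List.not_mem_nil, or_false, not_or] at hmem
      obtain ⟨h1, h2, h3, h4, h5, h6, h7, h8, h9, h10, h11, h12⟩ := hmem
      simp [pvTopics, h1, h2, h3, h4, h5, h6, h7, h8, h9, h10, h11, h12]

-- a Nodup-keyed dict is its key list paired with its values
theorem pvItems_eq_keys_map (d : PySem.Dict String (List (List (String × String))))
    (h : d.keys.Nodup) : d.items = d.keys.map (fun k => (k, d.getD k [])) := by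
  simp only [PySem.Dict.keys] at *
  rw [List.map_map]
  conv_lhs => rw [← List.map_id d.items]
  apply List.map_congr_left
  intro p hp
  obtain ⟨k, v⟩ := p
  simp [PySem.Dict.getD_of_mem_items d hp (by simpa [PySem.Dict.keys] using h)]

-- main invariant: folding pvStep1 produces exactly the staged-passes result
theorem pvInv (es : List (List (String × String)))
    (d : PySem.Dict String (List (List (String × String)))) (h : d.keys.Nodup) :
    (es.foldl pvStep1 d).items =
      (es.foldl pvOrderStep d.keys).map
        (fun t => (t, d.getD t [] ++ es.filter (fun e => pvTopicOf e == some t))) := by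
  induction es generalizing d with
  | nil => simpa using pvItems_eq_keys_map d h
  | cons e es ih =>
    simp only [List.foldl_cons]
    cases ht : pvTopicOf e with
    | none =>
      rw [show pvStep1 d e = d from by simp [pvStep1, ht],
          show pvOrderStep d.keys e = d.keys from by simp [pvOrderStep, ht], ih d h]
      congr 1
      funext t
      simp [ht]
    | some t0 =>
      have hstep : pvStep1 d e = d.modify t0 [] (· ++ [e]) := by simp [pvStep1, ht]
      have hkeys : (pvStep1 d e).keys = pvOrderStep d.keys e := by
        rw [hstep, PySem.Dict.keys_modify, pvOrderStep]
        by_cases hm : d.contains t0 = true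
        · rw [PySem.Dict.keys_insert_of_contains d _ hm, ht]
          simp [PySem.Dict.contains_eq_decide_mem_keys] at hm
          simp [hm]
        · rw [PySem.Dict.keys_insert_of_not_contains d _ (by simpa using hm), ht]
          simp [PySem.Dict.contains_eq_decide_mem_keys] at hm
          simp [hm]
      have hnd : (pvStep1 d e).keys.Nodup := by
        rw [hkeys, pvOrderStep]
        simp only [ht]
        split_ifs with hm
        · exact h
        · rw [List.nodup_append]
          exact ⟨h, List.nodup_singleton _, by intro a ha b hb; rw [List.mem_singleton] at hb; subst hb; exact fun h2 => hm (h2 ▸ ha)⟩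
      rw [ih (pvStep1 d e) hnd, hkeys]
      congr 1
      funext t
      by_cases htt : t = t0
      · subst htt
        simp [hstep, PySem.Dict.getD_modify_self, ht]
      · simp [hstep, PySem.Dict.getD_modify_of_ne d [] _ htt, ht, Ne.symm htt]

-- ===== VERDICT (by name: the statement is the Claim_ definition above) =====
theorem extract_entity_topics_spec : Claim_equal_extract_entity_topics := by
  intro entities _ _
  unfold Spec_extract_entity_topics extract_entity_topics extract_entity_topics_alt
  rw [show pvAStep = pvStep1 from funext fun c => funext fun e => pvAStep_eq_step1 c e]
  rw [pvInv entities PySem.Dict.empty (by simp [PySem.Dict.keys_empty])]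
  simp [PySem.Dict.keys_empty, PySem.Dict.getD_empty]
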